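-- pv_equiv track=rewrite | github.com/Veritas-EthGlobal/veritas | backend/function_boundaries.py | identify_function_boundaries_python
-- ===== SOURCE A (Python) =====
-- def identify_function_boundaries_python(code_string: str) -> list[tuple[int, int]]:
--     """
--     Identifies the start and end line numbers of all top-level functions in Python code.
--
--     Args:
--         code_string (str): The Python code as a string
--
--     Returns:
--         list[tuple[int, int]]: A list of tuples where each tuple contains
--                                (start_line, end_line) for each function
--     """
--     lines = code_string.split('\n')
--     function_boundaries = []
--     current_function_start = None
--
--     for i, line in enumerate(lines):
--         stripped_line = line.strip()
--
--         # Check if this line starts a function definition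
--         if stripped_line.startswith('def ') and ':' in stripped_line:
--             # If we were tracking a previous function, close it
--             if current_function_start is not None:
--                 function_boundaries.append((current_function_start, i - 1))
--
--             # Start tracking this new function
--             current_function_start = i + 1  # Line numbers are 1-indexed
--
--         # Check if we're at a non-indented line that's not empty or a comment
--         elif (current_function_start is not None and
--               line and
--               not line[0].isspace() and
--               not stripped_line.startswith('#')):
--             # This marks the end of the current function
--             function_boundaries.append((current_function_start, i))
--             current_function_start = None
--
--     # Handle the case where the last function goes to the end of the file
--     if current_function_start is not None:
--         function_boundaries.append((current_function_start, len(lines)))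
--
--     return function_boundaries
-- ===== SOURCE B (Python) =====
-- def identify_function_boundaries_python(code_string: str) -> list[tuple[int, int]]:
--     lines = code_string.split('\n')
--     # Pass 1: classify lines into an event table: (index, True)=def line, (index, False)=terminator line.
--     events = []
--     for i, line in enumerate(lines):
--         stripped = line.strip()
--         if stripped.startswith('def ') and ':' in stripped:
--             events.append((i, True))
--         elif line and not line[0].isspace() and not stripped.startswith('#'):
--             events.append((i, False))
--     # Pass 2: each def event closes at the next event (def: j-1, terminator: j) or at end of file.
--     out = []
--     for k, (i, is_def) in enumerate(events):
--         if is_def: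
--             if k + 1 < len(events):
--                 j, next_is_def = events[k + 1]
--                 out.append((i + 1, j - 1 if next_is_def else j))
--             else:
--                 out.append((i + 1, len(lines)))
--     return out
-- ===== Notes on version B (the rewrite author's own statement) =====
-- stated objective: alternative
-- what changed: Replaces A's single fold with a mutable current-function sentinel by two passes: first classify every line into an event table of def/terminator indices, then emit each (start, end) pair by one-event lookahead in that table.
import Mathlib
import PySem

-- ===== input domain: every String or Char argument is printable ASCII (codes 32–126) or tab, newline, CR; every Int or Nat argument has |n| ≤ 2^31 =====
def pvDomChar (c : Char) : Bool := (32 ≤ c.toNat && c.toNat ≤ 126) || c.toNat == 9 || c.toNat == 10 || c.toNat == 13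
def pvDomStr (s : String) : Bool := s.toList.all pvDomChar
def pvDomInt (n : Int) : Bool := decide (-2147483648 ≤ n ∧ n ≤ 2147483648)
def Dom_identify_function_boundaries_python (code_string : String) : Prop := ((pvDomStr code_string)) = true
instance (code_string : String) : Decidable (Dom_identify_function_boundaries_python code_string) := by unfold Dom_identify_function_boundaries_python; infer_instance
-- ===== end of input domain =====

-- B replaces A's single fold with a running sentinel by two passes — classify lines into a def/terminator event table, then emit pairs by one-event lookahead; objective: alternative decomposition, same cost.

-- ===== PORT A =====
-- one iteration of A's for-loop: state = (function_boundaries, current_function_start)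
def pvA_step (st : List (Int × Int) × Option Int) (p : Int × List Char) : List (Int × Int) × Option Int :=
  let stripped := PySem.Chars.strip p.2
  if PySem.Chars.startswith stripped "def ".toList && PySem.Chars.isIn [':'] stripped then
    match st.2 with
    | some s => (st.1 ++ [(s, p.1 - 1)], some (p.1 + 1))
    | none => (st.1, some (p.1 + 1))
  else
    match st.2 with
    | some s =>
      if (match p.2 with | [] => false | c :: _ => !PySem.Chars.isspace c) && !PySem.Chars.startswith stripped ['#'] then
        (st.1 ++ [(s, p.1)], none)
      else st
    | none => st

def identify_function_boundaries_python (code_string : String) : List (Int × Int) :=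
  let lines := PySem.Chars.splitOn code_string.toList ['\n']
  let st := (PySem.List.enumerate lines).foldl pvA_step ([], none)
  match st.2 with
  | some s => st.1 ++ [(s, (lines.length : Int))]
  | none => st.1

-- ===== PORT B =====
-- pass 1: classify a line into an event: some (i, true) = def line, some (i, false) = terminator line
def pvB_classify (p : Int × List Char) : Option (Int × Bool) :=
  let stripped := PySem.Chars.strip p.2
  if PySem.Chars.startswith stripped "def ".toList && PySem.Chars.isIn [':'] stripped then
    some (p.1, true)
  else if (match p.2 with | [] => false | c :: _ => !PySem.Chars.isspace c) && !PySem.Chars.startswith stripped ['#'] then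
    some (p.1, false)
  else none

-- pass 2: each def event closes at the next event (def: j-1, terminator: j) or at end of file (n)
def pvB_emit (n : Int) : List (Int × Bool) → List (Int × Int)
  | [] => []
  | (i, d) :: rest =>
    if d then
      (i + 1, match rest with | [] => n | (j, nd) :: _ => if nd then j - 1 else j) :: pvB_emit n rest
    else pvB_emit n rest

def identify_function_boundaries_python_alt (code_string : String) : List (Int × Int) :=
  let lines := PySem.Chars.splitOn code_string.toList ['\n']
  pvB_emit (lines.length : Int) ((PySem.List.enumerate lines).filterMap pvB_classify)

-- ===== PRECONDITION & SPEC =====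
def Spec_identify_function_boundaries_python (code_string : String) (out : List (Int × Int)) : Prop := out = identify_function_boundaries_python_alt code_string
instance (code_string : String) (out : List (Int × Int)) : Decidable (Spec_identify_function_boundaries_python code_string out) := by unfold Spec_identify_function_boundaries_python; infer_instance

-- ===== CLAIM (what is proved, stated in full; the proofs are below) =====
def Claim_equal_identify_function_boundaries_python : Prop := ∀ (code_string : String), Dom_identify_function_boundaries_python code_string → Spec_identify_function_boundaries_python code_string (identify_function_boundaries_python code_string)

-- ===== LEMMAS AND PROOFS =====

-- proof-side names for the two line tests both ports use inline ('def' line / top-level terminator line)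
def pvIsDef (line : List Char) : Bool :=
  PySem.Chars.startswith (PySem.Chars.strip line) "def ".toList
    && PySem.Chars.isIn [':'] (PySem.Chars.strip line)

def pvIsTerm (line : List Char) : Bool :=
  (match line with | [] => false | c :: _ => !PySem.Chars.isspace c)
    && !PySem.Chars.startswith (PySem.Chars.strip line) ['#']

theorem pvA_step_eq (st : List (Int × Int) × Option Int) (p : Int × List Char) :
    pvA_step st p =
      if pvIsDef p.2 then
        match st.2 with
        | some s => (st.1 ++ [(s, p.1 - 1)], some (p.1 + 1))
        | none => (st.1, some (p.1 + 1))
      else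
        match st.2 with
        | some s => if pvIsTerm p.2 then (st.1 ++ [(s, p.1)], none) else st
        | none => st := rfl

theorem pvB_classify_eq (p : Int × List Char) :
    pvB_classify p =
      if pvIsDef p.2 then some (p.1, true)
      else if pvIsTerm p.2 then some (p.1, false)
      else none := rfl

-- closing A's final state (the code after A's loop)
def pvFinish (n : Int) (st : List (Int × Int) × Option Int) : List (Int × Int) :=
  match st.2 with
  | some s => st.1 ++ [(s, n)]
  | none => st.1

-- the end line B assigns to a currently open function, read off the remaining events
def pvHeadF (n : Int) : List (Int × Bool) → Int
  | [] => n
  | (j, nd) :: _ => if nd then j - 1 else j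

theorem pvB_emit_cons_true (n i : Int) (rest : List (Int × Bool)) :
    pvB_emit n ((i, true) :: rest) = (i + 1, pvHeadF n rest) :: pvB_emit n rest := by
  cases rest with
  | nil => rfl
  | cons p r => rcases p with ⟨j, nd⟩; simp [pvB_emit, pvHeadF]

theorem pvB_emit_cons_false (n i : Int) (rest : List (Int × Bool)) :
    pvB_emit n ((i, false) :: rest) = pvB_emit n rest := by
  simp [pvB_emit]

theorem pvInv (n : Int) (xs : List (List Char)) : ∀ (s : Int) (acc : List (Int × Int)) (cur : Option Int),
    pvFinish n ((PySem.List.enumerate xs s).foldl pvA_step (acc, cur))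
    = acc ++ (match cur with
       | none => pvB_emit n ((PySem.List.enumerate xs s).filterMap pvB_classify)
       | some st => (st, pvHeadF n ((PySem.List.enumerate xs s).filterMap pvB_classify)) ::
                    pvB_emit n ((PySem.List.enumerate xs s).filterMap pvB_classify)) := by
  induction xs with
  | nil =>
    intro s acc cur
    cases cur <;> simp [PySem.List.enumerate_nil, pvFinish, pvB_emit, pvHeadF]
  | cons x xs ih =>
    intro s acc cur
    rw [PySem.List.enumerate_cons, List.foldl_cons, List.filterMap_cons]
    cases hdef : pvIsDef x with
    | true =>
      have hc : pvB_classify (s, x) = some (s, true) := by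
        rw [pvB_classify_eq]; simp [hdef]
      rw [hc]
      cases cur with
      | none =>
        have hs : pvA_step (acc, none) (s, x) = (acc, some (s + 1)) := by
          rw [pvA_step_eq]; simp [hdef]
        rw [hs, ih (s + 1) acc (some (s + 1)), pvB_emit_cons_true]
      | some st =>
        have hs : pvA_step (acc, some st) (s, x) = (acc ++ [(st, s - 1)], some (s + 1)) := by
          rw [pvA_step_eq]; simp [hdef]
        rw [hs, ih (s + 1) (acc ++ [(st, s - 1)]) (some (s + 1)), pvB_emit_cons_true]
        simp [pvHeadF]
    | false =>
      cases hterm : pvIsTerm x with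
      | true =>
        have hc : pvB_classify (s, x) = some (s, false) := by
          rw [pvB_classify_eq]; simp [hdef, hterm]
        rw [hc]
        cases cur with
        | none =>
          have hs : pvA_step (acc, none) (s, x) = (acc, none) := by
            rw [pvA_step_eq]; simp [hdef]
          rw [hs, ih (s + 1) acc none, pvB_emit_cons_false]
        | some st =>
          have hs : pvA_step (acc, some st) (s, x) = (acc ++ [(st, s)], none) := by
            rw [pvA_step_eq]; simp [hdef, hterm]
          rw [hs, ih (s + 1) (acc ++ [(st, s)]) none, pvB_emit_cons_false]
          simp [pvHeadF]
      | false =>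
        have hc : pvB_classify (s, x) = none := by
          rw [pvB_classify_eq]; simp [hdef, hterm]
        rw [hc]
        cases cur with
        | none =>
          have hs : pvA_step (acc, none) (s, x) = (acc, none) := by
            rw [pvA_step_eq]; simp [hdef]
          rw [hs]; exact ih (s + 1) acc none
        | some st =>
          have hs : pvA_step (acc, some st) (s, x) = (acc, some st) := by
            rw [pvA_step_eq]; simp [hdef, hterm]
          rw [hs]; exact ih (s + 1) acc (some st)

-- ===== VERDICT (by name: the statement is the Claim_ definition above) =====
theorem identify_function_boundaries_python_spec : Claim_equal_identify_function_boundaries_python := by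
  intro code_string _
  unfold Spec_identify_function_boundaries_python identify_function_boundaries_python
    identify_function_boundaries_python_alt
  have h := pvInv ((PySem.Chars.splitOn code_string.toList ['\n']).length : Int)
    (PySem.Chars.splitOn code_string.toList ['\n']) 0 [] none
  simpa [pvFinish] using h
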